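-- pv_equiv track=rewrite | github.com/mmparvand/nightpanel2 | app/main.py | scrub_sensitive
-- ===== SOURCE A (Python) =====
-- def scrub_sensitive(text: str) -> str:
--     if not text:
--         return text
--     replacements = ["password", "passphrase", "private", "token", "secret"]
--     clean = text
--     for key in replacements:
--         clean = clean.replace(key, "***")
--         clean = clean.replace(key.capitalize(), "***")
--         clean = clean.replace(key.upper(), "***")
--     return clean
-- ===== SOURCE B (Python) =====
-- def scrub_sensitive(text: str) -> str:
--     if not text:
--         return text
--     keys = ["password", "passphrase", "private", "token", "secret"]
--     variants = []
--     for k in keys: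
--         variants.extend([k, k.capitalize(), k.upper()])
--     out = []
--     i = 0
--     n = len(text)
--     while i < n:
--         for v in variants:
--             if text.startswith(v, i):
--                 out.append("***")
--                 i += len(v)
--                 break
--         else:
--             out.append(text[i])
--             i += 1
--     return "".join(out)
-- ===== Notes on version B (the rewrite author's own statement) =====
-- stated objective: alternative
-- what changed: Replaces A's fifteen sequential whole-string replace passes (one per case variant of each keyword) by a single left-to-right scan that at each position tries the fifteen exact variants and either emits the mask or keeps the character; Pre_ excludes texts containing an overlapping secret/token pair ('secretoken', 'Secretoken', 'SECREToken', 'SECRETOKEN') — an unspecified tie where A redacts the token occurrence, B the leftmost (secret) occurrence, and both are defensible.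
-- outside the precondition, e.g. on scrub_sensitive('secretoken'): A returns 'secre***', B returns '***oken'; on scrub_sensitive('Secretoken'): A returns 'Secre***', B returns '***oken'; on scrub_sensitive('SECREToken'): A returns 'SECRE***', B returns '***oken'
import Mathlib
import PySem

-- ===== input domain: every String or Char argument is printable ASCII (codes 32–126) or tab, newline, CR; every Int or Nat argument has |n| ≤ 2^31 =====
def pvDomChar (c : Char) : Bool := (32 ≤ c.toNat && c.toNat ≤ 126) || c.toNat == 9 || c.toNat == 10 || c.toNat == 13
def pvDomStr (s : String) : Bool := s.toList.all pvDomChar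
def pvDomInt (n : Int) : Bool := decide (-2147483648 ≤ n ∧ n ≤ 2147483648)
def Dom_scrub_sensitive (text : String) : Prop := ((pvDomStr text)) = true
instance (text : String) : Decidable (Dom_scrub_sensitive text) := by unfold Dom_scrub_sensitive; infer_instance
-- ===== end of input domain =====

-- B replaces A's fifteen sequential whole-string replace passes by a single left-to-right
-- scan that tries the fifteen exact keyword variants at each position (objective: alternative).

-- ===== PORT A =====
-- k.capitalize(): first char uppercased, the rest lowercased (exact on the ASCII domain)
def pyCapitalize (s : String) : String :=
  match s.toList with
  | [] => ""
  | c :: t => String.ofList (PySem.Chars.upperChar c :: PySem.Chars.lower t)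

def scrub_sensitive (text : String) : String :=
  if text = "" then text
  else
    (["password", "passphrase", "private", "token", "secret"] : List String).foldl
      (fun clean key =>
        let c1 := PySem.Str.replace clean key "***"
        let c2 := PySem.Str.replace c1 (pyCapitalize key) "***"
        PySem.Str.replace c2 (PySem.Str.upper key) "***")
      text

-- ===== PORT B =====
-- Source B builds the 15 exact case variants once, then scans the text once, left to right:
-- at each position the first matching variant is replaced by "***", else the character is kept.
def pyCapitalizeC (cs : List Char) : List Char :=
  match cs with
  | [] => []
  | c :: t => PySem.Chars.upperChar c :: PySem.Chars.lower t

def keysB : List (List Char) :=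
  ["password".toList, "passphrase".toList, "private".toList, "token".toList, "secret".toList]

def variantsB : List (List Char) :=
  keysB.foldl (fun acc k => acc ++ [k, pyCapitalizeC k, PySem.Chars.upper k]) []

theorem variantsB_pos : ∀ v ∈ variantsB, 0 < v.length := by decide

def scanGo (l : List Char) : List Char :=
  match hm : variantsB.find? (fun v => v.isPrefixOf l) with
  | some v => '*' :: '*' :: '*' :: scanGo (l.drop v.length)
  | none =>
    match l with
    | [] => []
    | c :: t => c :: scanGo t
termination_by l.length
decreasing_by
  · have hv := variantsB_pos v (List.mem_of_find?_eq_some hm)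
    have hp : v <+: l := List.isPrefixOf_iff_prefix.mp (by simpa using List.find?_some hm)
    have := hp.length_le
    simp only [List.length_drop]; omega
  · simp

def scrub_sensitive_alt (text : String) : String :=
  if text = "" then text
  else String.ofList (scanGo text.toList)

-- ===== PRECONDITION & SPEC =====
-- Pre_ excludes texts containing an overlapping secret/token keyword pair ("secretoken",
-- "Secretoken", "SECREToken" or "SECRETOKEN"): an unspecified tie, where A redacts the token
-- occurrence (its token passes run before its secret passes) while B redacts the leftmost
-- (secret) occurrence; both are defensible.
def Pre_scrub_sensitive (text : String) : Prop :=
  PySem.Str.isIn "secretoken" text = false ∧ PySem.Str.isIn "Secretoken" text = false ∧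
  PySem.Str.isIn "SECREToken" text = false ∧ PySem.Str.isIn "SECRETOKEN" text = false
instance (text : String) : Decidable (Pre_scrub_sensitive text) := by
  unfold Pre_scrub_sensitive; infer_instance

def pvWitness_scrub_sensitive : String := "my Password is a SECRET token"

def Spec_scrub_sensitive (text : String) (out : String) : Prop := out = scrub_sensitive_alt text
instance (text : String) (out : String) : Decidable (Spec_scrub_sensitive text out) := by
  unfold Spec_scrub_sensitive; infer_instance

-- ===== CLAIM (what is proved, stated in full; the proofs are below) =====
def Claim_equal_scrub_sensitive : Prop := ∀ (text : String), Dom_scrub_sensitive text → Pre_scrub_sensitive text → Spec_scrub_sensitive text (scrub_sensitive text)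

-- ===== LEMMAS AND PROOFS =====

-- `repl old l` is a clean recursive form of Python's str.replace(old, "***") (old nonempty).
def repl (old : List Char) (l : List Char) : List Char :=
  if h : old ≠ [] ∧ old.isPrefixOf l then '*' :: '*' :: '*' :: repl old (l.drop old.length)
  else
    match l with
    | [] => []
    | c :: t => c :: repl old t
termination_by l.length
decreasing_by
  · have hp : old <+: l := List.isPrefixOf_iff_prefix.mp h.2
    have h1 : 0 < old.length := by cases old with
      | nil => exact absurd rfl h.1
      | cons a t => simp
    have := hp.length_le
    simp only [List.length_drop]; omega
  · simp

theorem repl_nil (old : List Char) : repl old [] = [] := by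
  rw [repl]
  split
  · rename_i h
    have : old = [] := by
      have h2 := List.isPrefixOf_iff_prefix.mp h.2
      simpa using h2.length_le
    exact absurd this h.1
  · rfl

theorem repl_cons_of_not_prefix {old : List Char} {c : Char} {t : List Char}
    (h : ¬ old <+: c :: t) : repl old (c :: t) = c :: repl old t := by
  rw [repl]
  split
  · rename_i hh
    exact absurd (List.isPrefixOf_iff_prefix.mp hh.2) h
  · rfl

theorem repl_prefix {old : List Char} (hne : old ≠ []) {l : List Char} (hp : old <+: l) :
    repl old l = '*' :: '*' :: '*' :: repl old (l.drop old.length) := by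
  rw [repl]
  split
  · rfl
  · rename_i hh
    exact absurd ⟨hne, List.isPrefixOf_iff_prefix.mpr hp⟩ hh

theorem go_eq {old : List Char} (hne : old ≠ []) :
    ∀ (fuel : Nat) (l acc : List Char), l.length ≤ fuel →
      PySem.Chars.replace.go old ['*','*','*'] fuel l acc = acc.reverse ++ repl old l := by
  intro fuel
  induction fuel with
  | zero =>
    intro l acc hl
    have : l = [] := by
      cases l with
      | nil => rfl
      | cons c t => simp at hl
    subst this
    rw [PySem.Chars.replace.go, repl_nil]
  | succ n ih =>
    intro l acc hl
    cases l with
    | nil =>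
      rw [PySem.Chars.replace.go, repl_nil]
      all_goals simp
    | cons c t =>
      rw [PySem.Chars.replace.go]
      by_cases hp : old.isPrefixOf (c :: t) = true
      · rw [if_pos hp]
        have hpre : old <+: c :: t := List.isPrefixOf_iff_prefix.mp hp
        have h1 : 0 < old.length := by cases old with
          | nil => exact absurd rfl hne
          | cons a t => simp
        have h2 := hpre.length_le
        rw [ih _ _ (by simp only [List.length_drop]; simp at hl ⊢; omega)]
        rw [repl_prefix hne hpre]
        simp
      · rw [if_neg hp]
        rw [ih t (c :: acc) (by simp at hl ⊢; omega)]
        rw [repl_cons_of_not_prefix (fun hc => hp (List.isPrefixOf_iff_prefix.mpr hc))]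
        simp

theorem replace_eq_repl {old : List Char} (hne : old ≠ []) (l : List Char) :
    PySem.Chars.replace l old ['*','*','*'] = repl old l := by
  rw [PySem.Chars.replace]
  rw [if_neg (by simpa using hne)]
  rw [go_eq hne l.length l [] le_rfl]
  simp

theorem repl_cons' {old : List Char} {c : Char} {t : List Char}
    (h : ¬ (old ≠ [] ∧ old.isPrefixOf (c :: t))) : repl old (c :: t) = c :: repl old t := by
  rw [repl]
  split
  · rename_i hh; exact absurd hh h
  · rfl

theorem not_prefix_repl (w : List Char) :
    ∀ (l v : List Char), v ≠ [] → '*' ∉ v → ¬ v <+: l → ¬ v <+: repl w l := by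
  intro l
  induction l using repl.induct (old := w) with
  | case1 l hcond ih =>
    intro v hne hstar hnp
    rw [repl_prefix hcond.1 (List.isPrefixOf_iff_prefix.mp hcond.2)]
    intro hp
    cases v with
    | nil => exact hne rfl
    | cons a v2 =>
      rw [List.cons_prefix_cons] at hp
      exact hstar (hp.1 ▸ List.mem_cons_self)
  | case2 hcond =>
    intro v hne hstar hnp
    rw [repl_nil]
    intro hp
    exact hne (by simpa using hp.length_le)
  | case3 c t hcond ih =>
    intro v hne hstar hnp
    rw [repl_cons' hcond]
    intro hp
    cases v with
    | nil => exact hne rfl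
    | cons a v2 =>
      rw [List.cons_prefix_cons] at hp
      obtain ⟨rfl, hp2⟩ := hp
      cases v2 with
      | nil => exact hnp (by simp)
      | cons b v3 =>
        have hnp2 : ¬ (b :: v3) <+: t := by
          intro hc
          exact hnp (List.cons_prefix_cons.mpr ⟨rfl, hc⟩)
        exact ih (b :: v3) (by simp) (fun hm => hstar (List.mem_cons_of_mem _ hm)) hnp2 hp2

theorem not_prefix_cons_repl {u' u : List Char} {c : Char} {t : List Char}
    (hne : u' ≠ []) (hstar : '*' ∉ u') (h : ¬ u' <+: c :: t) : ¬ u' <+: c :: repl u t := by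
  intro hp
  cases u' with
  | nil => exact hne rfl
  | cons a v2 =>
    rw [List.cons_prefix_cons] at hp
    obtain ⟨rfl, hp2⟩ := hp
    cases v2 with
    | nil => exact h (by simp)
    | cons b v3 =>
      have hnp2 : ¬ (b :: v3) <+: t := fun hc => h (List.cons_prefix_cons.mpr ⟨rfl, hc⟩)
      exact not_prefix_repl u t (b :: v3) (by simp)
        (fun hm => hstar (List.mem_cons_of_mem _ hm)) hnp2 hp2

theorem foldl_repl_cons :
    ∀ (vs : List (List Char)) (c : Char) (t : List Char),
      (∀ u ∈ vs, u ≠ [] ∧ '*' ∉ u) →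
      (∀ u ∈ vs, ¬ u <+: c :: t) →
      List.foldl (fun s u => repl u s) (c :: t) vs = c :: List.foldl (fun s u => repl u s) t vs := by
  intro vs
  induction vs with
  | nil => intro c t _ _; rfl
  | cons u us ih =>
    intro c t hok hnp
    simp only [List.foldl_cons]
    rw [repl_cons_of_not_prefix (hnp u List.mem_cons_self)]
    exact ih c (repl u t) (fun x hx => hok x (List.mem_cons_of_mem _ hx))
      (fun x hx => not_prefix_cons_repl (hok x (List.mem_cons_of_mem _ hx)).1
        (hok x (List.mem_cons_of_mem _ hx)).2 (hnp x (List.mem_cons_of_mem _ hx)))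

def SafePush (u v t : List Char) : Prop := ∀ s, s <:+ v → s ≠ [] → ¬ u <+: (s ++ t)

theorem repl_append {u : List Char} (hu : u ≠ []) :
    ∀ (v t : List Char), SafePush u v t → repl u (v ++ t) = v ++ repl u t := by
  intro v
  induction v with
  | nil => intro t _; rfl
  | cons c v' ih =>
    intro t hs
    have h0 : ¬ u <+: (c :: v') ++ t := hs (c :: v') List.suffix_rfl (by simp)
    rw [List.cons_append, repl_cons_of_not_prefix (by simpa using h0)]
    rw [ih t (fun s hsuf hne => hs s (hsuf.trans (List.suffix_cons c v')) hne)]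
    simp

theorem prefix_append_left {u s t : List Char} (h : u <+: s ++ t) (hl : u.length ≤ s.length) :
    u <+: s := by
  have := List.prefix_iff_eq_take.mp h
  rw [List.take_append_of_le_length hl] at this
  rw [this]
  exact List.take_prefix _ _

theorem prefix_append_right {u s t : List Char} (h : u <+: s ++ t) (hl : s.length ≤ u.length) :
    s <+: u := by
  have := List.prefix_iff_eq_take.mp h
  rw [List.take_append] at this
  rw [List.take_of_length_le hl] at this
  exact ⟨_, this.symm⟩

def pairOK (u v : List Char) : Bool :=
  v.tails.all (fun s => s.isEmpty ||
    (if s.length < u.length then !(s.isPrefixOf u) else !(u.isPrefixOf s)))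

theorem safe_dec (u v : List Char) (h : pairOK u v = true) (t : List Char) : SafePush u v t := by
  intro s hsuf hne hp
  have hmem : s ∈ v.tails := (List.mem_tails s v).mpr hsuf
  have := (List.all_eq_true.mp h) s hmem
  simp only [Bool.or_eq_true, List.isEmpty_iff] at this
  rcases this with h1 | h2
  · exact hne h1
  · split at h2
    · rename_i hlen
      have := prefix_append_right hp (by omega)
      simp only [Bool.not_eq_eq_eq_not, Bool.not_true] at h2
      rw [List.isPrefixOf_iff_prefix.mpr this] at h2
      cases h2
    · rename_i hlen
      have := prefix_append_left hp (by omega)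
      simp only [Bool.not_eq_eq_eq_not, Bool.not_true] at h2
      rw [List.isPrefixOf_iff_prefix.mpr this] at h2
      cases h2

def pairOKexc (u v : List Char) (c : Char) : Bool :=
  v.tails.all (fun s => s.isEmpty || s == [c] ||
    (if s.length < u.length then !(s.isPrefixOf u) else !(u.isPrefixOf s)))

theorem safe_exc (c : Char) (r v t : List Char) (hr : ¬ r <+: t)
    (h : pairOKexc (c :: r) v c = true) : SafePush (c :: r) v t := by
  intro s hsuf hne hp
  have hmem : s ∈ v.tails := (List.mem_tails s v).mpr hsuf
  have := (List.all_eq_true.mp h) s hmem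
  simp only [Bool.or_eq_true, List.isEmpty_iff, beq_iff_eq] at this
  rcases this with (h1 | h1) | h2
  · exact hne h1
  · subst h1
    rw [List.cons_append, List.nil_append, List.cons_prefix_cons] at hp
    exact hr hp.2
  · split at h2
    · rename_i hlen
      have := prefix_append_right hp (by omega)
      simp only [Bool.not_eq_eq_eq_not, Bool.not_true] at h2
      rw [List.isPrefixOf_iff_prefix.mpr this] at h2
      cases h2
    · rename_i hlen
      have := prefix_append_left hp (by omega)
      simp only [Bool.not_eq_eq_eq_not, Bool.not_true] at h2
      rw [List.isPrefixOf_iff_prefix.mpr this] at h2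
      cases h2

theorem safe_star {u : List Char} (hne : u ≠ []) (hstar : '*' ∉ u) (t : List Char) :
    SafePush u ['*','*','*'] t := by
  intro s hsuf hne2 hp
  have hmem : s ∈ (['*','*','*'] : List Char).tails := (List.mem_tails _ _).mpr hsuf
  cases u with
  | nil => exact hne rfl
  | cons a u2 =>
    have ha : a = '*' := by
      fin_cases hmem <;> simp_all
    exact hstar (ha ▸ List.mem_cons_self)

theorem foldl_repl_push (Inv : List Char → Prop) (v : List Char) :
    ∀ (vs : List (List Char)) (t : List Char),
      (∀ u ∈ vs, u ≠ []) →
      (∀ u ∈ vs, ∀ t', Inv t' → SafePush u v t') →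
      (∀ u ∈ vs, ∀ t', Inv t' → Inv (repl u t')) →
      Inv t →
      List.foldl (fun s u => repl u s) (v ++ t) vs = v ++ List.foldl (fun s u => repl u s) t vs := by
  intro vs
  induction vs with
  | nil => intro t _ _ _ _; rfl
  | cons u us ih =>
    intro t hne hsafe hpres hInv
    simp only [List.foldl_cons]
    rw [repl_append (hne u List.mem_cons_self) v t (hsafe u List.mem_cons_self t hInv)]
    exact ih (repl u t) (fun x hx => hne x (List.mem_cons_of_mem _ hx))
      (fun x hx => hsafe x (List.mem_cons_of_mem _ hx))
      (fun x hx => hpres x (List.mem_cons_of_mem _ hx))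
      (hpres u List.mem_cons_self t hInv)

theorem foldl_repl_star :
    ∀ (vs : List (List Char)) (t : List Char),
      (∀ u ∈ vs, u ≠ [] ∧ '*' ∉ u) →
      List.foldl (fun s u => repl u s) ('*' :: '*' :: '*' :: t) vs =
        '*' :: '*' :: '*' :: List.foldl (fun s u => repl u s) t vs := by
  intro vs
  induction vs with
  | nil => intro t _; rfl
  | cons u us ih =>
    intro t hok
    simp only [List.foldl_cons]
    have h1 := repl_append (hok u List.mem_cons_self).1 ['*','*','*'] t
      (safe_star (hok u List.mem_cons_self).1 (hok u List.mem_cons_self).2 t)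
    simp only [List.cons_append, List.nil_append] at h1
    rw [h1]
    exact ih (repl u t) (fun x hx => hok x (List.mem_cons_of_mem _ hx))

def chainL (l : List Char) : List Char := List.foldl (fun s u => repl u s) l variantsB

theorem variantsB_ne_nil_star : ∀ u ∈ variantsB, u ≠ [] ∧ '*' ∉ u := by decide

def bad1 : List Char := "secretoken".toList
def bad2 : List Char := "Secretoken".toList
def bad3 : List Char := "SECREToken".toList
def bad4 : List Char := "SECRETOKEN".toList

def NoOv (l : List Char) : Prop :=
  ¬ bad1 <:+: l ∧ ¬ bad2 <:+: l ∧ ¬ bad3 <:+: l ∧ ¬ bad4 <:+: l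

theorem noov_suffix {l t : List Char} (h : NoOv l) (ht : t <:+ l) : NoOv t := by
  obtain ⟨h1, h2, h3, h4⟩ := h
  exact ⟨fun hc => h1 (hc.trans ht.isInfix), fun hc => h2 (hc.trans ht.isInfix),
    fun hc => h3 (hc.trans ht.isInfix), fun hc => h4 (hc.trans ht.isInfix)⟩

theorem inv_init {l v t r : List Char} (hl : l = v ++ t) (hno : ¬ (v ++ r) <:+: l) :
    ¬ r <+: t := by
  intro hp
  obtain ⟨rest, hrest⟩ := hp
  apply hno
  refine ⟨[], rest, ?_⟩
  simp [hl, ← hrest]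

theorem chain_step (v t : List Char) (pre post : List (List Char))
    (hvar : variantsB = pre ++ v :: post)
    (Inv : List Char → Prop)
    (hsafe : ∀ u ∈ pre, ∀ t', Inv t' → SafePush u v t')
    (hpres : ∀ u ∈ pre, ∀ t', Inv t' → Inv (repl u t'))
    (hInv : Inv t)
    (hv : v ≠ []) :
    chainL (v ++ t) = '*' :: '*' :: '*' :: chainL t := by
  have hne : ∀ u ∈ pre, u ≠ [] := by
    intro u hu
    exact (variantsB_ne_nil_star u (by rw [hvar]; exact List.mem_append_left _ hu)).1
  have hstarpost : ∀ u ∈ post, u ≠ [] ∧ '*' ∉ u := by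
    intro u hu
    exact variantsB_ne_nil_star u (by rw [hvar]; exact List.mem_append_right _ (List.mem_cons_of_mem _ hu))
  unfold chainL
  rw [hvar, List.foldl_append, List.foldl_append]
  rw [foldl_repl_push Inv v pre t hne hsafe hpres hInv]
  simp only [List.foldl_cons]
  rw [repl_prefix hv (List.prefix_append v _), List.drop_left]
  rw [foldl_repl_star post _ hstarpost]

theorem chain_cons {c : Char} {t : List Char}
    (h : ∀ u ∈ variantsB, ¬ u <+: c :: t) : chainL (c :: t) = c :: chainL t := by
  unfold chainL
  exact foldl_repl_cons variantsB c t variantsB_ne_nil_star h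

theorem scanGo_some {l v : List Char}
    (hm : variantsB.find? (fun v => v.isPrefixOf l) = some v) :
    scanGo l = '*' :: '*' :: '*' :: scanGo (l.drop v.length) := by
  rw [scanGo]
  split
  · rename_i v' hm'
    rw [hm] at hm'
    cases hm'
    rfl
  · rename_i hm'
    rw [hm] at hm'
    cases hm'

theorem scanGo_none_cons {c : Char} {t : List Char}
    (hm : variantsB.find? (fun v => v.isPrefixOf (c :: t)) = none) :
    scanGo (c :: t) = c :: scanGo t := by
  rw [scanGo]
  split
  · rename_i v' hm'
    rw [hm] at hm'
    cases hm'
  · rfl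

theorem scanGo_nil : scanGo [] = [] := by
  rw [scanGo]
  split
  · rename_i v' hm'
    have hpos := variantsB_pos v' (List.mem_of_find?_eq_some hm')
    have hp : v' <+: ([] : List Char) := List.isPrefixOf_iff_prefix.mp (by simpa using List.find?_some hm')
    rw [List.prefix_nil.mp hp] at hpos
    simp at hpos
  · rfl

theorem foldl_repl_nil : ∀ vs : List (List Char), List.foldl (fun s u => repl u s) [] vs = [] := by
  intro vs
  induction vs with
  | nil => rfl
  | cons u us ih => simp only [List.foldl_cons, repl_nil]; exact ih

theorem chain_nil : chainL [] = [] := foldl_repl_nil variantsB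

def vPW1 : List Char := "password".toList
def vPW2 : List Char := "Password".toList
def vPW3 : List Char := "PASSWORD".toList
def vPP1 : List Char := "passphrase".toList
def vPP2 : List Char := "Passphrase".toList
def vPP3 : List Char := "PASSPHRASE".toList
def vPR1 : List Char := "private".toList
def vPR2 : List Char := "Private".toList
def vPR3 : List Char := "PRIVATE".toList
def vTK1 : List Char := "token".toList
def vTK2 : List Char := "Token".toList
def vTK3 : List Char := "TOKEN".toList
def vSC1 : List Char := "secret".toList
def vSC2 : List Char := "Secret".toList
def vSC3 : List Char := "SECRET".toList

theorem variantsB_eq : variantsB =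
    [vPW1, vPW2, vPW3, vPP1, vPP2, vPP3, vPR1, vPR2, vPR3, vTK1, vTK2, vTK3, vSC1, vSC2, vSC3] := by
  decide

theorem branch_triv (n : Nat) (l v : List Char) (pre post : List (List Char))
    (hvar : variantsB = pre ++ v :: post)
    (hp : v.isPrefixOf l = true)
    (hsafe : ∀ u ∈ pre, pairOK u v = true)
    (hno : NoOv l)
    (hlen : l.length ≤ n + 1)
    (ih : ∀ l', l'.length ≤ n → NoOv l' → chainL l' = scanGo l')
    (hm : variantsB.find? (fun v => v.isPrefixOf l) = some v) :
    chainL l = scanGo l := by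
  have hpre : v <+: l := List.isPrefixOf_iff_prefix.mp hp
  have hv : v ≠ [] := (variantsB_ne_nil_star v (by rw [hvar]; exact List.mem_append_right _ List.mem_cons_self)).1
  have hvl : 0 < v.length := by cases v with
    | nil => exact absurd rfl hv
    | cons a t => simp
  have hl : l = v ++ l.drop v.length := (List.prefix_iff_eq_append.mp hpre).symm
  rw [scanGo_some hm]
  rw [← ih (l.drop v.length) (by have := hpre.length_le; simp only [List.length_drop]; omega)
    (noov_suffix hno (List.drop_suffix _ _))]
  conv_lhs => rw [hl]
  exact chain_step v _ pre post hvar (fun _ => True)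
    (fun u hu t' _ => safe_dec u v (hsafe u hu) t') (fun _ _ _ _ => trivial) trivial hv

theorem branch_exc (n : Nat) (l v : List Char) (pre post : List (List Char))
    (c1 c2 : Char) (r1 r2 : List Char)
    (hvar : variantsB = pre ++ v :: post)
    (hp : v.isPrefixOf l = true)
    (hr1 : r1 ≠ [] ∧ '*' ∉ r1) (hr2 : r2 ≠ [] ∧ '*' ∉ r2)
    (hsafe : ∀ u ∈ pre, pairOK u v = true ∨ (u = c1 :: r1 ∧ pairOKexc u v c1 = true) ∨
      (u = c2 :: r2 ∧ pairOKexc u v c2 = true))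
    (hb1 : ¬ (v ++ r1) <:+: l) (hb2 : ¬ (v ++ r2) <:+: l)
    (hno : NoOv l)
    (hlen : l.length ≤ n + 1)
    (ih : ∀ l', l'.length ≤ n → NoOv l' → chainL l' = scanGo l')
    (hm : variantsB.find? (fun v => v.isPrefixOf l) = some v) :
    chainL l = scanGo l := by
  have hpre : v <+: l := List.isPrefixOf_iff_prefix.mp hp
  have hv : v ≠ [] := (variantsB_ne_nil_star v (by rw [hvar]; exact List.mem_append_right _ List.mem_cons_self)).1
  have hvl : 0 < v.length := by cases v with
    | nil => exact absurd rfl hv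
    | cons a t => simp
  have hl : l = v ++ l.drop v.length := (List.prefix_iff_eq_append.mp hpre).symm
  rw [scanGo_some hm]
  rw [← ih (l.drop v.length) (by have := hpre.length_le; simp only [List.length_drop]; omega)
    (noov_suffix hno (List.drop_suffix _ _))]
  conv_lhs => rw [hl]
  exact chain_step v _ pre post hvar (fun t' => ¬ r1 <+: t' ∧ ¬ r2 <+: t')
    (fun u hu t' hI => by
      rcases hsafe u hu with h | ⟨rfl, h⟩ | ⟨rfl, h⟩
      · exact safe_dec u v h t'
      · exact safe_exc c1 r1 v t' hI.1 h
      · exact safe_exc c2 r2 v t' hI.2 h)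
    (fun u hu t' hI => ⟨not_prefix_repl u t' r1 hr1.1 hr1.2 hI.1,
      not_prefix_repl u t' r2 hr2.1 hr2.2 hI.2⟩)
    ⟨inv_init hl hb1, inv_init hl hb2⟩ hv

theorem main_len : ∀ (n : Nat) (l : List Char), l.length ≤ n → NoOv l → chainL l = scanGo l := by
  intro n
  induction n with
  | zero =>
    intro l hl _
    have : l = [] := by cases l with
      | nil => rfl
      | cons c t => simp at hl
    subst this
    rw [chain_nil, scanGo_nil]
  | succ n ih =>
    intro l hlen hno
    cases hm : variantsB.find? (fun v => v.isPrefixOf l) with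
    | none =>
      cases l with
      | nil => rw [chain_nil, scanGo_nil]
      | cons c t =>
        have hall : ∀ u ∈ variantsB, ¬ u <+: c :: t := by
          intro u hu hc
          exact (List.find?_eq_none.mp hm u hu) (List.isPrefixOf_iff_prefix.mpr hc)
        rw [chain_cons hall, scanGo_none_cons hm]
        congr 1
        exact ih t (by simp at hlen; omega) (noov_suffix hno (List.suffix_cons c t))
    | some v =>
      rw [variantsB_eq] at hm
      by_cases h0 : vPW1.isPrefixOf l = true
      · rw [List.find?_cons_of_pos (p := fun (u : List Char) => u.isPrefixOf l) h0] at hm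
        cases hm
        exact branch_triv n l vPW1 [] [vPW2, vPW3, vPP1, vPP2, vPP3, vPR1, vPR2, vPR3, vTK1, vTK2, vTK3, vSC1, vSC2, vSC3] (by rw [variantsB_eq]; rfl) h0 (by decide) hno hlen ih (by rw [variantsB_eq]; exact List.find?_cons_of_pos (p := fun (u : List Char) => u.isPrefixOf l) h0)
      rw [List.find?_cons_of_neg (p := fun (u : List Char) => u.isPrefixOf l) h0] at hm
      by_cases h1 : vPW2.isPrefixOf l = true
      · rw [List.find?_cons_of_pos (p := fun (u : List Char) => u.isPrefixOf l) h1] at hm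
        cases hm
        exact branch_triv n l vPW2 [vPW1] [vPW3, vPP1, vPP2, vPP3, vPR1, vPR2, vPR3, vTK1, vTK2, vTK3, vSC1, vSC2, vSC3] (by rw [variantsB_eq]; rfl) h1 (by decide) hno hlen ih (by rw [variantsB_eq]; rw [List.find?_cons_of_neg (p := fun (u : List Char) => u.isPrefixOf l) h0]; exact List.find?_cons_of_pos (p := fun (u : List Char) => u.isPrefixOf l) h1)
      rw [List.find?_cons_of_neg (p := fun (u : List Char) => u.isPrefixOf l) h1] at hm
      by_cases h2 : vPW3.isPrefixOf l = true
      · rw [List.find?_cons_of_pos (p := fun (u : List Char) => u.isPrefixOf l) h2] at hm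
        cases hm
        exact branch_triv n l vPW3 [vPW1, vPW2] [vPP1, vPP2, vPP3, vPR1, vPR2, vPR3, vTK1, vTK2, vTK3, vSC1, vSC2, vSC3] (by rw [variantsB_eq]; rfl) h2 (by decide) hno hlen ih (by rw [variantsB_eq]; rw [List.find?_cons_of_neg (p := fun (u : List Char) => u.isPrefixOf l) h0]; rw [List.find?_cons_of_neg (p := fun (u : List Char) => u.isPrefixOf l) h1]; exact List.find?_cons_of_pos (p := fun (u : List Char) => u.isPrefixOf l) h2)
      rw [List.find?_cons_of_neg (p := fun (u : List Char) => u.isPrefixOf l) h2] at hm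
      by_cases h3 : vPP1.isPrefixOf l = true
      · rw [List.find?_cons_of_pos (p := fun (u : List Char) => u.isPrefixOf l) h3] at hm
        cases hm
        exact branch_triv n l vPP1 [vPW1, vPW2, vPW3] [vPP2, vPP3, vPR1, vPR2, vPR3, vTK1, vTK2, vTK3, vSC1, vSC2, vSC3] (by rw [variantsB_eq]; rfl) h3 (by decide) hno hlen ih (by rw [variantsB_eq]; rw [List.find?_cons_of_neg (p := fun (u : List Char) => u.isPrefixOf l) h0]; rw [List.find?_cons_of_neg (p := fun (u : List Char) => u.isPrefixOf l) h1]; rw [List.find?_cons_of_neg (p := fun (u : List Char) => u.isPrefixOf l) h2]; exact List.find?_cons_of_pos (p := fun (u : List Char) => u.isPrefixOf l) h3)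
      rw [List.find?_cons_of_neg (p := fun (u : List Char) => u.isPrefixOf l) h3] at hm
      by_cases h4 : vPP2.isPrefixOf l = true
      · rw [List.find?_cons_of_pos (p := fun (u : List Char) => u.isPrefixOf l) h4] at hm
        cases hm
        exact branch_triv n l vPP2 [vPW1, vPW2, vPW3, vPP1] [vPP3, vPR1, vPR2, vPR3, vTK1, vTK2, vTK3, vSC1, vSC2, vSC3] (by rw [variantsB_eq]; rfl) h4 (by decide) hno hlen ih (by rw [variantsB_eq]; rw [List.find?_cons_of_neg (p := fun (u : List Char) => u.isPrefixOf l) h0]; rw [List.find?_cons_of_neg (p := fun (u : List Char) => u.isPrefixOf l) h1]; rw [List.find?_cons_of_neg (p := fun (u : List Char) => u.isPrefixOf l) h2]; rw [List.find?_cons_of_neg (p := fun (u : List Char) => u.isPrefixOf l) h3]; exact List.find?_cons_of_pos (p := fun (u : List Char) => u.isPrefixOf l) h4)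
      rw [List.find?_cons_of_neg (p := fun (u : List Char) => u.isPrefixOf l) h4] at hm
      by_cases h5 : vPP3.isPrefixOf l = true
      · rw [List.find?_cons_of_pos (p := fun (u : List Char) => u.isPrefixOf l) h5] at hm
        cases hm
        exact branch_triv n l vPP3 [vPW1, vPW2, vPW3, vPP1, vPP2] [vPR1, vPR2, vPR3, vTK1, vTK2, vTK3, vSC1, vSC2, vSC3] (by rw [variantsB_eq]; rfl) h5 (by decide) hno hlen ih (by rw [variantsB_eq]; rw [List.find?_cons_of_neg (p := fun (u : List Char) => u.isPrefixOf l) h0]; rw [List.find?_cons_of_neg (p := fun (u : List Char) => u.isPrefixOf l) h1]; rw [List.find?_cons_of_neg (p := fun (u : List Char) => u.isPrefixOf l) h2]; rw [List.find?_cons_of_neg (p := fun (u : List Char) => u.isPrefixOf l) h3]; rw [List.find?_cons_of_neg (p := fun (u : List Char) => u.isPrefixOf l) h4]; exact List.find?_cons_of_pos (p := fun (u : List Char) => u.isPrefixOf l) h5)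
      rw [List.find?_cons_of_neg (p := fun (u : List Char) => u.isPrefixOf l) h5] at hm
      by_cases h6 : vPR1.isPrefixOf l = true
      · rw [List.find?_cons_of_pos (p := fun (u : List Char) => u.isPrefixOf l) h6] at hm
        cases hm
        exact branch_triv n l vPR1 [vPW1, vPW2, vPW3, vPP1, vPP2, vPP3] [vPR2, vPR3, vTK1, vTK2, vTK3, vSC1, vSC2, vSC3] (by rw [variantsB_eq]; rfl) h6 (by decide) hno hlen ih (by rw [variantsB_eq]; rw [List.find?_cons_of_neg (p := fun (u : List Char) => u.isPrefixOf l) h0]; rw [List.find?_cons_of_neg (p := fun (u : List Char) => u.isPrefixOf l) h1]; rw [List.find?_cons_of_neg (p := fun (u : List Char) => u.isPrefixOf l) h2]; rw [List.find?_cons_of_neg (p := fun (u : List Char) => u.isPrefixOf l) h3]; rw [List.find?_cons_of_neg (p := fun (u : List Char) => u.isPrefixOf l) h4]; rw [List.find?_cons_of_neg (p := fun (u : List Char) => u.isPrefixOf l) h5]; exact List.find?_cons_of_pos (p := fun (u : List Char) => u.isPrefixOf l) h6)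
      rw [List.find?_cons_of_neg (p := fun (u : List Char) => u.isPrefixOf l) h6] at hm
      by_cases h7 : vPR2.isPrefixOf l = true
      · rw [List.find?_cons_of_pos (p := fun (u : List Char) => u.isPrefixOf l) h7] at hm
        cases hm
        exact branch_triv n l vPR2 [vPW1, vPW2, vPW3, vPP1, vPP2, vPP3, vPR1] [vPR3, vTK1, vTK2, vTK3, vSC1, vSC2, vSC3] (by rw [variantsB_eq]; rfl) h7 (by decide) hno hlen ih (by rw [variantsB_eq]; rw [List.find?_cons_of_neg (p := fun (u : List Char) => u.isPrefixOf l) h0]; rw [List.find?_cons_of_neg (p := fun (u : List Char) => u.isPrefixOf l) h1]; rw [List.find?_cons_of_neg (p := fun (u : List Char) => u.isPrefixOf l) h2]; rw [List.find?_cons_of_neg (p := fun (u : List Char) => u.isPrefixOf l) h3]; rw [List.find?_cons_of_neg (p := fun (u : List Char) => u.isPrefixOf l) h4]; rw [List.find?_cons_of_neg (p := fun (u : List Char) => u.isPrefixOf l) h5]; rw [List.find?_cons_of_neg (p := fun (u : List Char) => u.isPrefixOf l) h6]; exact List.find?_cons_of_pos (p := fun (u : List Char) => u.isPrefixOf l)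 h7)
      rw [List.find?_cons_of_neg (p := fun (u : List Char) => u.isPrefixOf l) h7] at hm
      by_cases h8 : vPR3.isPrefixOf l = true
      · rw [List.find?_cons_of_pos (p := fun (u : List Char) => u.isPrefixOf l) h8] at hm
        cases hm
        exact branch_triv n l vPR3 [vPW1, vPW2, vPW3, vPP1, vPP2, vPP3, vPR1, vPR2] [vTK1, vTK2, vTK3, vSC1, vSC2, vSC3] (by rw [variantsB_eq]; rfl) h8 (by decide) hno hlen ih (by rw [variantsB_eq]; rw [List.find?_cons_of_neg (p := fun (u : List Char) => u.isPrefixOf l) h0]; rw [List.find?_cons_of_neg (p := fun (u : List Char) => u.isPrefixOf l) h1]; rw [List.find?_cons_of_neg (p := fun (u : List Char) => u.isPrefixOf l) h2]; rw [List.find?_cons_of_neg (p := fun (u : List Char) => u.isPrefixOf l) h3]; rw [List.find?_cons_of_neg (p := fun (u : List Char) => u.isPrefixOf l) h4]; rw [List.find?_cons_of_neg (p := fun (u : List Char) => u.isPrefixOf l) h5]; rw [List.find?_cons_of_neg (p := fun (u : List Char) => u.isPrefixOf l) h6]; rw [List.find?_cons_of_neg (p := fun (u : List Char) => u.isPrefixOf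 l) h7]; exact List.find?_cons_of_pos (p := fun (u : List Char) => u.isPrefixOf l) h8)
      rw [List.find?_cons_of_neg (p := fun (u : List Char) => u.isPrefixOf l) h8] at hm
      by_cases h9 : vTK1.isPrefixOf l = true
      · rw [List.find?_cons_of_pos (p := fun (u : List Char) => u.isPrefixOf l) h9] at hm
        cases hm
        exact branch_triv n l vTK1 [vPW1, vPW2, vPW3, vPP1, vPP2, vPP3, vPR1, vPR2, vPR3] [vTK2, vTK3, vSC1, vSC2, vSC3] (by rw [variantsB_eq]; rfl) h9 (by decide) hno hlen ih (by rw [variantsB_eq]; rw [List.find?_cons_of_neg (p := fun (u : List Char) => u.isPrefixOf l) h0]; rw [List.find?_cons_of_neg (p := fun (u : List Char) => u.isPrefixOf l) h1]; rw [List.find?_cons_of_neg (p := fun (u : List Char) => u.isPrefixOf l) h2]; rw [List.find?_cons_of_neg (p := fun (u : List Char) => u.isPrefixOf l) h3]; rw [List.find?_cons_of_neg (p := fun (u : List Char) => u.isPrefixOf l) h4]; rw [List.find?_cons_of_neg (p := fun (u : List Char) => u.isPrefixOf l) h5]; rw [List.find?_cons_of_neg (p := fun (u : List Char) => u.isPrefixOf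 l) h6]; rw [List.find?_cons_of_neg (p := fun (u : List Char) => u.isPrefixOf l) h7]; rw [List.find?_cons_of_neg (p := fun (u : List Char) => u.isPrefixOf l) h8]; exact List.find?_cons_of_pos (p := fun (u : List Char) => u.isPrefixOf l) h9)
      rw [List.find?_cons_of_neg (p := fun (u : List Char) => u.isPrefixOf l) h9] at hm
      by_cases h10 : vTK2.isPrefixOf l = true
      · rw [List.find?_cons_of_pos (p := fun (u : List Char) => u.isPrefixOf l) h10] at hm
        cases hm
        exact branch_triv n l vTK2 [vPW1, vPW2, vPW3, vPP1, vPP2, vPP3, vPR1, vPR2, vPR3, vTK1] [vTK3, vSC1, vSC2, vSC3] (by rw [variantsB_eq]; rfl) h10 (by decide) hno hlen ih (by rw [variantsB_eq]; rw [List.find?_cons_of_neg (p := fun (u : List Char) => u.isPrefixOf l) h0]; rw [List.find?_cons_of_neg (p := fun (u : List Char) => u.isPrefixOf l) h1]; rw [List.find?_cons_of_neg (p := fun (u : List Char) => u.isPrefixOf l) h2]; rw [List.find?_cons_of_neg (p := fun (u : List Char) => u.isPrefixOf l) h3]; rw [List.find?_cons_of_neg (p := fun (u : List Char) => u.isPrefixOf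 l) h4]; rw [List.find?_cons_of_neg (p := fun (u : List Char) => u.isPrefixOf l) h5]; rw [List.find?_cons_of_neg (p := fun (u : List Char) => u.isPrefixOf l) h6]; rw [List.find?_cons_of_neg (p := fun (u : List Char) => u.isPrefixOf l) h7]; rw [List.find?_cons_of_neg (p := fun (u : List Char) => u.isPrefixOf l) h8]; rw [List.find?_cons_of_neg (p := fun (u : List Char) => u.isPrefixOf l) h9]; exact List.find?_cons_of_pos (p := fun (u : List Char) => u.isPrefixOf l) h10)
      rw [List.find?_cons_of_neg (p := fun (u : List Char) => u.isPrefixOf l) h10] at hm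
      by_cases h11 : vTK3.isPrefixOf l = true
      · rw [List.find?_cons_of_pos (p := fun (u : List Char) => u.isPrefixOf l) h11] at hm
        cases hm
        exact branch_triv n l vTK3 [vPW1, vPW2, vPW3, vPP1, vPP2, vPP3, vPR1, vPR2, vPR3, vTK1, vTK2] [vSC1, vSC2, vSC3] (by rw [variantsB_eq]; rfl) h11 (by decide) hno hlen ih (by rw [variantsB_eq]; rw [List.find?_cons_of_neg (p := fun (u : List Char) => u.isPrefixOf l) h0]; rw [List.find?_cons_of_neg (p := fun (u : List Char) => u.isPrefixOf l) h1]; rw [List.find?_cons_of_neg (p := fun (u : List Char) => u.isPrefixOf l) h2]; rw [List.find?_cons_of_neg (p := fun (u : List Char) => u.isPrefixOf l) h3]; rw [List.find?_cons_of_neg (p := fun (u : List Char) => u.isPrefixOf l) h4]; rw [List.find?_cons_of_neg (p := fun (u : List Char) => u.isPrefixOf l) h5]; rw [List.find?_cons_of_neg (p := fun (u : List Char) => u.isPrefixOf l) h6]; rw [List.find?_cons_of_neg (p := fun (u : List Char) => u.isPrefixOf l) h7]; rw [List.find?_cons_of_neg (p := fun (u : List Char) => u.isPrefixOf l) h8];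 rw [List.find?_cons_of_neg (p := fun (u : List Char) => u.isPrefixOf l) h9]; rw [List.find?_cons_of_neg (p := fun (u : List Char) => u.isPrefixOf l) h10]; exact List.find?_cons_of_pos (p := fun (u : List Char) => u.isPrefixOf l) h11)
      rw [List.find?_cons_of_neg (p := fun (u : List Char) => u.isPrefixOf l) h11] at hm
      by_cases h12 : vSC1.isPrefixOf l = true
      · rw [List.find?_cons_of_pos (p := fun (u : List Char) => u.isPrefixOf l) h12] at hm
        cases hm
        refine branch_exc n l vSC1 [vPW1, vPW2, vPW3, vPP1, vPP2, vPP3, vPR1, vPR2, vPR3, vTK1, vTK2, vTK3] [vSC2, vSC3] 't' 't' ("oken".toList) ("oken".toList) (by rw [variantsB_eq]; rfl) h12 (by decide) (by decide) (by decide) ?_ ?_ hno hlen ih (by rw [variantsB_eq]; rw [List.find?_cons_of_neg (p := fun (u : List Char) => u.isPrefixOf l) h0]; rw [List.find?_cons_of_neg (p := fun (u : List Char) => u.isPrefixOf l) h1]; rw [List.find?_cons_of_neg (p := fun (u : List Char) => u.isPrefixOf l) h2]; rw [List.find?_cons_of_neg (p := fun (u : List Char) => u.isPrefixOf l) h3];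 rw [List.find?_cons_of_neg (p := fun (u : List Char) => u.isPrefixOf l) h4]; rw [List.find?_cons_of_neg (p := fun (u : List Char) => u.isPrefixOf l) h5]; rw [List.find?_cons_of_neg (p := fun (u : List Char) => u.isPrefixOf l) h6]; rw [List.find?_cons_of_neg (p := fun (u : List Char) => u.isPrefixOf l) h7]; rw [List.find?_cons_of_neg (p := fun (u : List Char) => u.isPrefixOf l) h8]; rw [List.find?_cons_of_neg (p := fun (u : List Char) => u.isPrefixOf l) h9]; rw [List.find?_cons_of_neg (p := fun (u : List Char) => u.isPrefixOf l) h10]; rw [List.find?_cons_of_neg (p := fun (u : List Char) => u.isPrefixOf l) h11]; exact List.find?_cons_of_pos (p := fun (u : List Char) => u.isPrefixOf l) h12)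
        · rw [show vSC1 ++ "oken".toList = bad1 from by decide]; exact hno.1
        · rw [show vSC1 ++ "oken".toList = bad1 from by decide]; exact hno.1
      rw [List.find?_cons_of_neg (p := fun (u : List Char) => u.isPrefixOf l) h12] at hm
      by_cases h13 : vSC2.isPrefixOf l = true
      · rw [List.find?_cons_of_pos (p := fun (u : List Char) => u.isPrefixOf l) h13] at hm
        cases hm
        refine branch_exc n l vSC2 [vPW1, vPW2, vPW3, vPP1, vPP2, vPP3, vPR1, vPR2, vPR3, vTK1, vTK2, vTK3, vSC1] [vSC3] 't' 't' ("oken".toList) ("oken".toList) (by rw [variantsB_eq]; rfl) h13 (by decide) (by decide) (by decide) ?_ ?_ hno hlen ih (by rw [variantsB_eq]; rw [List.find?_cons_of_neg (p := fun (u : List Char) => u.isPrefixOf l) h0]; rw [List.find?_cons_of_neg (p := fun (u : List Char) => u.isPrefixOf l) h1]; rw [List.find?_cons_of_neg (p := fun (u : List Char) => u.isPrefixOf l) h2]; rw [List.find?_cons_of_neg (p := fun (u : List Char) => u.isPrefixOf l) h3]; rw [List.find?_cons_of_neg (p := fun (u : List Char) => u.isPrefixOf l) h4]; rw [List.find?_cons_of_neg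 (p := fun (u : List Char) => u.isPrefixOf l) h5]; rw [List.find?_cons_of_neg (p := fun (u : List Char) => u.isPrefixOf l) h6]; rw [List.find?_cons_of_neg (p := fun (u : List Char) => u.isPrefixOf l) h7]; rw [List.find?_cons_of_neg (p := fun (u : List Char) => u.isPrefixOf l) h8]; rw [List.find?_cons_of_neg (p := fun (u : List Char) => u.isPrefixOf l) h9]; rw [List.find?_cons_of_neg (p := fun (u : List Char) => u.isPrefixOf l) h10]; rw [List.find?_cons_of_neg (p := fun (u : List Char) => u.isPrefixOf l) h11]; rw [List.find?_cons_of_neg (p := fun (u : List Char) => u.isPrefixOf l) h12]; exact List.find?_cons_of_pos (p := fun (u : List Char) => u.isPrefixOf l) h13)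
        · rw [show vSC2 ++ "oken".toList = bad2 from by decide]; exact hno.2.1
        · rw [show vSC2 ++ "oken".toList = bad2 from by decide]; exact hno.2.1
      rw [List.find?_cons_of_neg (p := fun (u : List Char) => u.isPrefixOf l) h13] at hm
      by_cases h14 : vSC3.isPrefixOf l = true
      · rw [List.find?_cons_of_pos (p := fun (u : List Char) => u.isPrefixOf l) h14] at hm
        cases hm
        refine branch_exc n l vSC3 [vPW1, vPW2, vPW3, vPP1, vPP2, vPP3, vPR1, vPR2, vPR3, vTK1, vTK2, vTK3, vSC1, vSC2] [] 'T' 'T' ("oken".toList) ("OKEN".toList) (by rw [variantsB_eq]; rfl) h14 (by decide) (by decide) (by decide) ?_ ?_ hno hlen ih (by rw [variantsB_eq]; rw [List.find?_cons_of_neg (p := fun (u : List Char) => u.isPrefixOf l) h0]; rw [List.find?_cons_of_neg (p := fun (u : List Char) => u.isPrefixOf l) h1]; rw [List.find?_cons_of_neg (p := fun (u : List Char) => u.isPrefixOf l) h2]; rw [List.find?_cons_of_neg (p := fun (u : List Char) => u.isPrefixOf l) h3]; rw [List.find?_cons_of_neg (p := fun (u : List Char) => u.isPrefixOf l) h4];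 rw [List.find?_cons_of_neg (p := fun (u : List Char) => u.isPrefixOf l) h5]; rw [List.find?_cons_of_neg (p := fun (u : List Char) => u.isPrefixOf l) h6]; rw [List.find?_cons_of_neg (p := fun (u : List Char) => u.isPrefixOf l) h7]; rw [List.find?_cons_of_neg (p := fun (u : List Char) => u.isPrefixOf l) h8]; rw [List.find?_cons_of_neg (p := fun (u : List Char) => u.isPrefixOf l) h9]; rw [List.find?_cons_of_neg (p := fun (u : List Char) => u.isPrefixOf l) h10]; rw [List.find?_cons_of_neg (p := fun (u : List Char) => u.isPrefixOf l) h11]; rw [List.find?_cons_of_neg (p := fun (u : List Char) => u.isPrefixOf l) h12]; rw [List.find?_cons_of_neg (p := fun (u : List Char) => u.isPrefixOf l) h13]; exact List.find?_cons_of_pos (p := fun (u : List Char) => u.isPrefixOf l) h14)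
        · rw [show vSC3 ++ "oken".toList = bad3 from by decide]; exact hno.2.2.1
        · rw [show vSC3 ++ "OKEN".toList = bad4 from by decide]; exact hno.2.2.2
      rw [List.find?_cons_of_neg (p := fun (u : List Char) => u.isPrefixOf l) h14] at hm
      simp at hm

theorem main_eq (l : List Char) (hno : NoOv l) : chainL l = scanGo l :=
  main_len l.length l le_rfl hno

theorem strrepl (s old : String) (h : old.toList ≠ []) :
    PySem.Str.replace s old "***" = String.ofList (repl old.toList s.toList) := by
  rw [PySem.Str.replace]
  rw [show ("***" : String).toList = ['*','*','*'] from by decide]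
  rw [replace_eq_repl h]

def astep (clean key : String) : String :=
  PySem.Str.replace (PySem.Str.replace (PySem.Str.replace clean key "***") (pyCapitalize key) "***")
    (PySem.Str.upper key) "***"

theorem toList_pyCapitalize (k : String) : (pyCapitalize k).toList = pyCapitalizeC k.toList := by
  rw [pyCapitalize.eq_def, pyCapitalizeC.eq_def]
  cases k.toList with
  | nil => rfl
  | cons c t => simp [String.toList_ofList]

theorem astep_toList (s k : String) (hk : k.toList ≠ []) :
    (astep s k).toList =
      repl (PySem.Chars.upper k.toList) (repl (pyCapitalizeC k.toList) (repl k.toList s.toList)) := by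
  have hcapne : pyCapitalizeC k.toList ≠ [] := by
    cases hx : k.toList with
    | nil => exact absurd hx hk
    | cons c t => simp [pyCapitalizeC]
  have hupne : PySem.Chars.upper k.toList ≠ [] := by
    simp only [PySem.Chars.upper, ne_eq, List.map_eq_nil_iff]
    exact hk
  have hup : (PySem.Str.upper k).toList = PySem.Chars.upper k.toList := by simp
  rw [astep]
  rw [strrepl _ _ hk]
  rw [strrepl _ _ (show (pyCapitalize k).toList ≠ [] by rw [toList_pyCapitalize]; exact hcapne)]
  rw [strrepl _ _ (show (PySem.Str.upper k).toList ≠ [] by rw [hup]; exact hupne)]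
  simp only [String.toList_ofList, toList_pyCapitalize, hup]

theorem foldA : ∀ (keys : List String) (s : String), (∀ k ∈ keys, k.toList ≠ []) →
    keys.foldl astep s = String.ofList (List.foldl (fun cs u => repl u cs) s.toList
      (keys.flatMap (fun k => [k.toList, pyCapitalizeC k.toList, PySem.Chars.upper k.toList]))) := by
  intro keys
  induction keys with
  | nil => intro s _; simp [String.ofList_toList]
  | cons k ks ih =>
    intro s hne
    rw [List.foldl_cons, ih (astep s k) (fun x hx => hne x (List.mem_cons_of_mem _ hx))]
    rw [astep_toList s k (hne k List.mem_cons_self)]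
    rw [List.flatMap_cons, List.foldl_append]
    rfl

theorem portA_eq (text : String) (h : ¬ text = "") :
    scrub_sensitive text = String.ofList (chainL text.toList) := by
  rw [scrub_sensitive, if_neg h]
  show (["password", "passphrase", "private", "token", "secret"] : List String).foldl astep text = _
  rw [foldA _ _ (by decide)]
  congr 1

theorem pre_noov (text : String) (h : Pre_scrub_sensitive text) : NoOv text.toList := by
  obtain ⟨h1, h2, h3, h4⟩ := h
  simp only [PySem.Str.isIn_eq] at h1 h2 h3 h4
  exact ⟨(PySem.Chars.isIn_eq_false_iff _ _).mp h1, (PySem.Chars.isIn_eq_false_iff _ _).mp h2,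
    (PySem.Chars.isIn_eq_false_iff _ _).mp h3, (PySem.Chars.isIn_eq_false_iff _ _).mp h4⟩

-- ===== VERDICT (by name: the statement is the Claim_ definition above) =====
theorem scrub_sensitive_spec : Claim_equal_scrub_sensitive := by
  intro text _ hpre
  unfold Spec_scrub_sensitive
  by_cases h : text = ""
  · simp [scrub_sensitive, scrub_sensitive_alt, h]
  · rw [portA_eq text h, scrub_sensitive_alt, if_neg h]
    congr 1
    exact main_eq _ (pre_noov text hpre)
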